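-- pv_equiv track=rewrite | github.com/amirfarhat/rotornet-simulations | simulator/matchings.py | _make_matchings
-- ===== SOURCE A (Python) =====
-- def _make_matchings(tors):
--         matchings = []
--         for shift in range(1, len(tors)):
--             matching = []
--             for i, src_tor in enumerate(tors):
--                 # match tor (i) to tor (i + shift) without self-links
--                 dst_tor = tors[(i + shift) % len(tors)]
--                 matching.append((src_tor, dst_tor))
--             matchings.append(matching)
--         return matchings
-- ===== SOURCE B (Python) =====
-- def _make_matchings(tors):
--     # Transposed construction: iterate over source tors once, distributing each
--     # source's cyclic-successor list across all matchings simultaneously.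
--     matchings = [[] for _ in range(len(tors) - 1)]
--     for i, src in enumerate(tors):
--         dsts = tors[i + 1:] + tors[:i]
--         for col, dst in zip(matchings, dsts):
--             col.append((src, dst))
--     return matchings
-- ===== Notes on version B (the rewrite author's own statement) =====
-- stated objective: alternative
-- what changed: B transposes the construction: instead of an outer loop over shifts building each matching with per-element modular indexing, it makes a single pass over the source tors, computing each source's cyclic-successor list once and appending its pairs column-wise into all matchings at the same time.
import Mathlib
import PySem

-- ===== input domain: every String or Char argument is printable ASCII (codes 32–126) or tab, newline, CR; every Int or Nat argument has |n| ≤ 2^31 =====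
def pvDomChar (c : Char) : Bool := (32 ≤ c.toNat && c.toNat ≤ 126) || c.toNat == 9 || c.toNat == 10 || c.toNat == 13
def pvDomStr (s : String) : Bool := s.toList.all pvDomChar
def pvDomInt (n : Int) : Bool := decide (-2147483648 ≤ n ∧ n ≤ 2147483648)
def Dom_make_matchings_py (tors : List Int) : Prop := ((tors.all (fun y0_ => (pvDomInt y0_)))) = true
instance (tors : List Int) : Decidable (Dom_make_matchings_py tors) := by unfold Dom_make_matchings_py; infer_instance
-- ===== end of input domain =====

-- B builds the matchings transposed: one pass over source tors, distributing each source's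
-- cyclic-successor list column-wise into all matchings at once (alternative decomposition); identical output.

-- ===== PORT A =====
-- outer loop over shifts; inner loop appends (src, tors[(i+shift)%len(tors)]);
-- the index is always in range inside the loop, so pyGetD's default 0 is never used
def make_matchings_py (tors : List Int) : List (List (Int × Int)) :=
  (PySem.List.pyRange 1 tors.length 1).foldl (fun matchings shift =>
    matchings ++ [
      (PySem.List.enumerate tors 0).foldl (fun matching p =>
        matching ++ [(p.2, PySem.List.pyGetD tors (PySem.Int.mod (p.1 + shift) tors.length) 0)]) []
    ]) []

-- ===== PORT B =====
-- matchings = [[] for _ in range(len(tors)-1)]; for i, src in enumerate(tors):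
--   dsts = tors[i+1:] + tors[:i]; for col, dst in zip(matchings, dsts): col.append((src, dst))
-- (the in-place col.append over zip(matchings, dsts) is, functionally, replacing each
--  zipped column by col ++ [(src, dst)] — ported as zip-then-map over the same pair list)
def make_matchings_py_alt (tors : List Int) : List (List (Int × Int)) :=
  (PySem.List.enumerate tors 0).foldl
    (fun matchings p =>
      (List.zip matchings (PySem.List.slice tors (some (p.1 + 1)) none ++ PySem.List.slice tors none (some p.1))).map
        (fun q => q.1 ++ [(p.2, q.2)]))
    ((PySem.List.pyRange 0 ((tors.length : Int) - 1) 1).map (fun _ => ([] : List (Int × Int))))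

-- ===== PRECONDITION & SPEC =====
def Spec_make_matchings_py (tors : List Int) (out : List (List (Int × Int))) : Prop := out = make_matchings_py_alt tors
instance (tors : List Int) (out : List (List (Int × Int))) : Decidable (Spec_make_matchings_py tors out) := by unfold Spec_make_matchings_py; infer_instance

-- ===== CLAIM (what is proved, stated in full; the proofs are below) =====
def Claim_equal_make_matchings_py : Prop := ∀ (tors : List Int), Dom_make_matchings_py tors → Spec_make_matchings_py tors (make_matchings_py tors)

-- ===== LEMMAS AND PROOFS =====

-- the column-distribution step of B, with the pairing pushed into the row
def pvStep (acc : List (List (Int × Int))) (r : List (Int × Int)) : List (List (Int × Int)) :=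
  (List.zip acc r).map (fun q => q.1 ++ [q.2])

-- the row contributed by an enumerate pair p = (index, source tor)
def pvRow (tors : List Int) (p : Int × Int) : List (Int × Int) :=
  (tors.drop (p.1.toNat + 1) ++ tors.take p.1.toNat).map (fun d => (p.2, d))

theorem pv_alt_eq_foldRows (tors : List Int) :
    make_matchings_py_alt tors =
      ((PySem.List.enumerate tors 0).map (pvRow tors)).foldl pvStep
        ((PySem.List.pyRange 0 ((tors.length : Int) - 1) 1).map (fun _ => ([] : List (Int × Int)))) := by
  unfold make_matchings_py_alt
  rw [List.foldl_map]
  refine PySem.List.foldl_congr_mem _ _ _ _ ?_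
  intro acc p hp
  rcases (PySem.List.mem_enumerate_iff _ _ _).1 hp with ⟨k, hk, rfl⟩
  have h2 : (0 : Int) + (k : Int) = ((k : Nat) : Int) := by ring
  have h1 : ((k : Nat) : Int) + 1 = ((k + 1 : Nat) : Int) := by push_cast; ring
  simp only [pvRow, pvStep, h2, h1, Int.toNat_natCast,
    PySem.List.slice_from_natCast, PySem.List.slice_to_natCast,
    List.zip_map_right, List.map_map]
  apply List.map_congr_left
  rintro ⟨a, b⟩ _
  rfl

theorem pv_fold_length (rows : List (List (Int × Int))) (acc : List (List (Int × Int)))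
    (h : ∀ r ∈ rows, acc.length ≤ r.length) :
    (rows.foldl pvStep acc).length = acc.length := by
  induction rows generalizing acc with
  | nil => rfl
  | cons r rows ih =>
    have hr : acc.length ≤ r.length := h r (by simp)
    have hlen : (pvStep acc r).length = acc.length := by
      simp [pvStep, List.length_zip]; omega
    rw [List.foldl_cons, ih (pvStep acc r) (fun r' hr' => by rw [hlen]; exact h r' (by simp [hr'])),
      hlen]

theorem pv_fold_getD (rows : List (List (Int × Int))) (acc : List (List (Int × Int)))
    (h : ∀ r ∈ rows, acc.length ≤ r.length) (k : Nat) (hk : k < acc.length) :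
    (rows.foldl pvStep acc).getD k [] = acc.getD k [] ++ rows.map (fun r => r.getD k (0, 0)) := by
  induction rows generalizing acc with
  | nil => simp
  | cons r rows ih =>
    have hr : acc.length ≤ r.length := h r (by simp)
    have hlen : (pvStep acc r).length = acc.length := by
      simp [pvStep, List.length_zip]; omega
    rw [List.foldl_cons,
      ih (pvStep acc r) (fun r' hr' => by rw [hlen]; exact h r' (by simp [hr'])) (by omega)]
    have hkr : k < r.length := by omega
    have hkz : k < (List.zip acc r).length := by rw [List.length_zip]; omega
    have hstep : (pvStep acc r).getD k [] = acc.getD k [] ++ [r.getD k (0, 0)] := by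
      rw [List.getD_eq_getElem _ _ (by omega : k < (pvStep acc r).length),
        List.getD_eq_getElem _ _ hk, List.getD_eq_getElem _ _ hkr]
      simp [pvStep, List.getElem_zip]
    rw [hstep, List.map_cons, List.append_assoc, List.singleton_append]

-- A's inner loop equals zip with the rotation by `shift`
theorem pv_inner_eq (tors : List Int) (shift : Int)
    (h1 : 1 ≤ shift) (h2 : shift < tors.length) :
    (PySem.List.enumerate tors 0).foldl (fun matching p =>
        matching ++ [(p.2, PySem.List.pyGetD tors (PySem.Int.mod (p.1 + shift) tors.length) 0)]) []
    = List.zip tors (tors.rotate shift.toNat) := by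
  rw [PySem.List.foldl_append_singleton_eq_map, List.nil_append]
  have hnpos : (0:Int) < tors.length := by omega
  apply List.ext_getElem
  · simp [PySem.List.length_enumerate, List.length_zip, List.length_rotate]
  · intro j hj1 hj2
    simp only [List.length_map, PySem.List.length_enumerate] at hj1
    rw [List.getElem_map, PySem.List.getElem_enumerate, List.getElem_zip, List.getElem_rotate]
    have hmod : PySem.Int.mod ((0 + (j:Int)) + shift) tors.length
        = (((j + shift.toNat) % tors.length : Nat) : Int) := by
      rw [PySem.Int.mod_eq_emod_of_pos hnpos]
      have : ((0:Int) + (j:Int)) + shift = ((j + shift.toNat : Nat) : Int) := by push_cast; omega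
      rw [this]
      push_cast; ring
    rw [hmod, PySem.List.pyGetD_natCast]
    congr 1
    exact List.getD_eq_getElem _ _ (Nat.mod_lt _ (by omega))

-- a column of B's transposed build is A's matching for shift = k+1
theorem pv_column_eq (tors : List Int) (k : Nat) (hk : k + 1 < tors.length) :
    ((PySem.List.enumerate tors 0).map (pvRow tors)).map (fun r => r.getD k (0, 0))
      = List.zip tors (tors.rotate (k + 1)) := by
  apply List.ext_getElem
  · simp [PySem.List.length_enumerate, List.length_zip, List.length_rotate]
  · intro j hj1 hj2
    simp only [List.length_map, PySem.List.length_enumerate] at hj1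
    rw [List.getElem_map, List.getElem_map, PySem.List.getElem_enumerate,
      List.getElem_zip, List.getElem_rotate]
    have hrowlen : (tors.drop (j + 1) ++ tors.take j).length = tors.length - 1 := by
      simp; omega
    have hkrow : k < ((pvRow tors ((0 : Int) + (j : Nat), tors[j])).length) := by
      simp only [pvRow, List.length_map]
      have : ((0:Int) + (j:Nat)).toNat = j := by omega
      rw [this, hrowlen]; omega
    rw [List.getD_eq_getElem _ _ hkrow]
    simp only [pvRow, List.getElem_map]
    have hj' : ((0:Int) + (j:Nat)).toNat = j := by omega
    congr 1
    simp only [hj']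
    rw [List.getElem_append]
    by_cases hc : k < (tors.drop (j + 1)).length
    · rw [dif_pos hc, List.getElem_drop]
      congr 1
      rw [List.length_drop] at hc
      have := Nat.mod_eq_of_lt (show j + (k + 1) < tors.length by omega)
      omega
    · rw [dif_neg hc, List.getElem_take]
      congr 1
      rw [List.length_drop] at hc ⊢
      have h2n : j + (k + 1) < 2 * tors.length := by omega
      have : (j + (k + 1)) % tors.length = j + (k + 1) - tors.length := by
        rw [Nat.mod_eq_sub_mod (by omega), Nat.mod_eq_of_lt (by omega)]
      omega

-- ===== VERDICT (by name: the statement is the Claim_ definition above) =====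
theorem make_matchings_py_spec : Claim_equal_make_matchings_py := by
  intro tors _
  unfold Spec_make_matchings_py
  rw [pv_alt_eq_foldRows]
  unfold make_matchings_py
  rw [PySem.List.foldl_append_singleton_eq_map, List.nil_append]
  have hinitlen :
      ((PySem.List.pyRange 0 ((tors.length : Int) - 1) 1).map
        (fun _ => ([] : List (Int × Int)))).length = ((tors.length : Int) - 1).toNat := by
    rw [List.length_map, PySem.List.length_pyRange_one]
    congr 1; omega
  have hrows : ∀ r ∈ (PySem.List.enumerate tors 0).map (pvRow tors),
      ((PySem.List.pyRange 0 ((tors.length : Int) - 1) 1).map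
        (fun _ => ([] : List (Int × Int)))).length ≤ r.length := by
    intro r hr
    rcases List.mem_map.1 hr with ⟨p, hp, rfl⟩
    rcases (PySem.List.mem_enumerate_iff _ _ _).1 hp with ⟨j, hj, rfl⟩
    rw [hinitlen]
    simp only [pvRow, List.length_map, List.length_append, List.length_drop, List.length_take]
    have : ((0:Int) + (j:Nat)).toNat = j := by omega
    rw [this]; omega
  apply List.ext_getElem
  · rw [List.length_map, PySem.List.length_pyRange_one,
      pv_fold_length _ _ hrows, hinitlen]
  · intro k hk1 hk2
    rw [List.length_map, PySem.List.length_pyRange_one] at hk1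
    have hkn : k + 1 < tors.length := by omega
    have hklt : k < ((PySem.List.pyRange 0 ((tors.length : Int) - 1) 1).map
        (fun _ => ([] : List (Int × Int)))).length := by rw [hinitlen]; omega
    rw [List.getElem_map, PySem.List.getElem_pyRange_one]
    rw [← List.getD_eq_getElem _ [] hk2, pv_fold_getD _ _ hrows k hklt]
    have hinit0 : ((PySem.List.pyRange 0 ((tors.length : Int) - 1) 1).map
        (fun _ => ([] : List (Int × Int)))).getD k [] = [] := by
      rw [List.getD_eq_getElem _ _ hklt, List.getElem_map]
    rw [hinit0, List.nil_append, pv_column_eq tors k hkn]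
    have h1k : ((1 : Int) + (k : Nat)).toNat = k + 1 := by omega
    rw [pv_inner_eq tors (1 + k) (by omega) (by omega), h1k]
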